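-- pv_equiv track=rewrite | github.com/subhojitdas/prepper | src/greedy/maximum_number__non_intersecting_substrings.py | maxSubstrings
-- ===== SOURCE A (Python) =====
-- import bisect
-- import collections
--
-- def maxSubstrings(word: str) -> int:
--     N = len(word)
--
--     indices = collections.defaultdict(list)
--     for idx, ch in enumerate(word):
--         indices[ch].append(idx)
--
--     events = [None] * N
--     for idx, ch in enumerate(word):
--         nindex = bisect.bisect_left(indices[ch], idx + 3)
--         if nindex < len(indices[ch]):
--             events[idx] = indices[ch][nindex]
--
--
--     current = 0
--     best = [0] * (N + 1)
--     for i in range(N):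
--         if events[i] is not None:
--             nindex = events[i]
--             best[nindex] = current + 1
--         current = max(current, best[i])
--     return current
-- ===== SOURCE B (Python) =====
-- def maxSubstrings(word: str) -> int:
--     N = len(word)
--
--     # Right-to-left sweep: for each position i, find the nearest index j >= i + 3
--     # holding the same character, keeping only the up-to-3 nearest occurrences of
--     # each character to the right (the first qualifying one is always among them).
--     events = [None] * N
--     recent = {}
--     for i in range(N - 1, -1, -1):
--         c = word[i]
--         occs = recent.get(c, [])
--         for j in occs:
--             if j >= i + 3:
--                 events[i] = j
--                 break
--         recent[c] = [i] + occs[:2]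
--
--     # Forward pass: pending[j] = count obtainable by an interval ending at j.
--     current = 0
--     pending = {}
--     for i in range(N):
--         j = events[i]
--         if j is not None:
--             pending[j] = current + 1
--         current = max(current, pending.get(i, 0))
--     return current
-- ===== Notes on version B (the rewrite author's own statement) =====
-- stated objective: alternative
-- what changed: The per-position bisect over precomputed full per-character occurrence lists is replaced by a single right-to-left sweep that keeps only the up-to-3 nearest occurrences of each character to the right (the first same-char index >= i+3 is always among them), and the dense best-array of the forward pass is replaced by a sparse dict of pending interval ends.
import Mathlib
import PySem

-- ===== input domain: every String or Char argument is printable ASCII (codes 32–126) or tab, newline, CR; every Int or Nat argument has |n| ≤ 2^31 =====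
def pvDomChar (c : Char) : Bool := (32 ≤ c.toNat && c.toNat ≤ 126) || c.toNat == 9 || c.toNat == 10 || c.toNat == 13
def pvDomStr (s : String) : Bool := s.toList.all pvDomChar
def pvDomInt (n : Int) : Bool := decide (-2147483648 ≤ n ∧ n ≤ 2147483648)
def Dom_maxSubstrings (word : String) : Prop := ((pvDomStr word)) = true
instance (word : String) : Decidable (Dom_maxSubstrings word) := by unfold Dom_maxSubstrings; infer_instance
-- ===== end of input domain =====

-- B replaces A's per-position bisect over precomputed full occurrence lists by a single
-- right-to-left sweep keeping only the up-to-3 nearest occurrences of each character,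
-- and the dense best-array of the forward pass by a sparse dict.

-- ===== PORT A =====
-- indices = defaultdict(list); for idx, ch in enumerate(word): indices[ch].append(idx)
def pvIndicesA (cs : List Char) : PySem.Dict Char (List Int) :=
  (PySem.List.enumerate cs 0).foldl
    (fun d p => d.modify p.2 [] (fun l => l ++ [p.1])) PySem.Dict.empty

-- events = [None]*N; for idx, ch in enumerate(word): nindex = bisect_left(indices[ch], idx+3);
--   if nindex < len(indices[ch]): events[idx] = indices[ch][nindex]
def pvEventsA (cs : List Char) : List (Option Int) :=
  (PySem.List.enumerate cs 0).foldl
    (fun ev p =>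
      let lst := (pvIndicesA cs).getD p.2 []
      let nindex := PySem.List.bisectLeft lst (p.1 + 3)
      if h : nindex < lst.length then PySem.List.pySetD ev p.1 (some lst[nindex]) else ev)
    (List.replicate cs.length none)

def maxSubstrings (word : String) : Int :=
  let cs := word.toList
  let N : Int := PySem.Str.len word
  let events := pvEventsA cs
  -- current = 0; best = [0]*(N+1); for i in range(N): if events[i] is not None:
  --   best[events[i]] = current + 1; current = max(current, best[i])
  let st := (PySem.List.pyRange 0 N 1).foldl
    (fun (st : Int × List Int) i =>
      let best' := match PySem.List.pyGetD events i none with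
        | some nindex => PySem.List.pySetD st.2 nindex (st.1 + 1)
        | none => st.2
      (max st.1 (PySem.List.pyGetD best' i 0), best'))
    (0, List.replicate (cs.length + 1) 0)
  st.1

-- ===== PORT B =====
-- events = [None]*N; recent = {}; for i in range(N-1, -1, -1): c = word[i];
--   occs = recent.get(c, []); for j in occs: if j >= i+3: events[i] = j; break
--   recent[c] = [i] + occs[:2]
def pvSweepB (cs : List Char) : List (Option Int) × PySem.Dict Char (List Int) :=
  (PySem.List.pyRange ((cs.length : Int) - 1) (-1) (-1)).foldl
    (fun st i =>
      let c := PySem.List.pyGetD cs i 'A'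
      let occs := st.2.getD c []
      let ev := match occs.find? (fun j => decide (i + 3 ≤ j)) with
        | some j => PySem.List.pySetD st.1 i (some j)
        | none => st.1
      (ev, st.2.insert c (i :: PySem.List.slice occs none (some 2))))
    (List.replicate cs.length none, PySem.Dict.empty)

def maxSubstrings_alt (word : String) : Int :=
  let cs := word.toList
  let N : Int := PySem.Str.len word
  let events := (pvSweepB cs).1
  -- current = 0; pending = {}; for i in range(N): j = events[i];
  --   if j is not None: pending[j] = current + 1; current = max(current, pending.get(i, 0))
  let st := (PySem.List.pyRange 0 N 1).foldl
    (fun (st : Int × PySem.Dict Int Int) i =>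
      let pending := match PySem.List.pyGetD events i none with
        | some j => st.2.insert j (st.1 + 1)
        | none => st.2
      (max st.1 (pending.getD i 0), pending))
    (0, PySem.Dict.empty)
  st.1

-- ===== PRECONDITION & SPEC =====
def Spec_maxSubstrings (word : String) (out : Int) : Prop := out = maxSubstrings_alt word
instance (word : String) (out : Int) : Decidable (Spec_maxSubstrings word out) := by unfold Spec_maxSubstrings; infer_instance

-- ===== CLAIM (what is proved, stated in full; the proofs are below) =====
def Claim_equal_maxSubstrings : Prop := ∀ (word : String), Dom_maxSubstrings word → Spec_maxSubstrings word (maxSubstrings word)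

-- ===== LEMMAS AND PROOFS =====

-- the sorted list of positions of c in cs (as Python ints)
def pvOcc (cs : List Char) (c : Char) : List Int :=
  (PySem.List.pyRange 0 (cs.length : Int) 1).filter (fun j => PySem.List.pyGetD cs j 'A' == c)

-- positions of c in cs that are ≥ i
def pvOccFrom (cs : List Char) (c : Char) (i : Nat) : List Int :=
  (PySem.List.pyRange (i : Int) (cs.length : Int) 1).filter (fun j => PySem.List.pyGetD cs j 'A' == c)

-- the common characterisation of both event arrays: first same-char position ≥ i+3
def pvEv (cs : List Char) (i : Nat) : Option Int :=
  (pvOcc cs (cs.getD i 'A')).find? (fun j => decide ((i : Int) + 3 ≤ j))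

def pvEvList (cs : List Char) : List (Option Int) :=
  (List.range cs.length).map (pvEv cs)

-- A's per-index event value, as a function (the body of A's events loop)
def pvHA (cs : List Char) (p : Int × Char) : Option Int :=
  let lst := pvOcc cs p.2
  let n := PySem.List.bisectLeft lst (p.1 + 3)
  if h : n < lst.length then some lst[n] else none

-- B's loop body, named so the sweep invariant can be stated about it
def pvStepB (cs : List Char) (st : List (Option Int) × PySem.Dict Char (List Int)) (i : Int) :
    List (Option Int) × PySem.Dict Char (List Int) :=
  let c := PySem.List.pyGetD cs i 'A'
  let occs := st.2.getD c []
  let ev := match occs.find? (fun j => decide (i + 3 ≤ j)) with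
    | some j => PySem.List.pySetD st.1 i (some j)
    | none => st.1
  (ev, st.2.insert c (i :: PySem.List.slice occs none (some 2)))

-- invariant of B's right-to-left sweep after the positions ≥ i have been processed
def pvInv (cs : List Char) (i : Nat) (st : List (Option Int) × PySem.Dict Char (List Int)) : Prop :=
  st.1 = (List.range cs.length).map (fun m => if m < i then none else pvEv cs m) ∧
  ∀ c, st.2.getD c [] = (pvOccFrom cs c i).take 3

theorem pvOcc_pairwise (cs : List Char) (c : Char) : (pvOcc cs c).Pairwise (· ≤ ·) :=
  ((PySem.List.pairwise_lt_pyRange_one 0 (cs.length : Int)).filter _).imp (fun h => le_of_lt h)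

theorem pvOccFrom_pairwise (cs : List Char) (c : Char) (i : Nat) :
    (pvOccFrom cs c i).Pairwise (· < ·) :=
  (PySem.List.pairwise_lt_pyRange_one (i : Int) (cs.length : Int)).filter _

theorem mem_pvOcc (cs : List Char) (c : Char) {j : Int} (h : j ∈ pvOcc cs c) :
    0 ≤ j ∧ j < (cs.length : Int) :=
  PySem.List.mem_pyRange_one.1 (List.mem_filter.1 h).1

theorem mem_pvOccFrom (cs : List Char) (c : Char) (i : Nat) {j : Int} (h : j ∈ pvOccFrom cs c i) :
    (i : Int) ≤ j ∧ j < (cs.length : Int) :=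
  PySem.List.mem_pyRange_one.1 (List.mem_filter.1 h).1

theorem pvIndicesA_getD (cs : List Char) (c : Char) :
    (pvIndicesA cs).getD c [] = pvOcc cs c := by
  have h1 : (pvIndicesA cs).getD c [] =
      ((PySem.List.enumerate cs 0).filter (fun p => p.2 == c)).map (·.1) := by
    have := PySem.Dict.getD_foldl_modify_append
      (l := (PySem.List.enumerate cs 0).map (fun p => (p.2, p.1)))
      (d := (PySem.Dict.empty : PySem.Dict Char (List Int))) (c := c)
    simpa [pvIndicesA, List.foldl_map, List.filter_map, Function.comp] using this
  rw [h1, PySem.List.enumerate_eq_map_pyRange cs 'A']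
  simp [pvOcc, List.filter_map, Function.comp_def, PySem.List.len_eq]

-- bisect_left + guarded index equals find? (first element ≥ x) on a sorted list
theorem pv_find?_of_bisect (x : Int) :
    ∀ (L : List Int) (n : Nat), n ≤ L.length →
    (∀ (j : Nat) (hj : j < L.length), j < n → L[j] < x) →
    (∀ (j : Nat) (hj : j < L.length), n ≤ j → x ≤ L[j]) →
    L.find? (fun j => decide (x ≤ j)) = if h : n < L.length then some L[n] else none := by
  intro L
  induction L with
  | nil => intro n _ _ _; simp
  | cons a t ih =>
    intro n hn h1 h2
    cases n with
    | zero =>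
      have hx : x ≤ a := h2 0 (by simp) (by omega)
      rw [List.find?_cons_of_pos (by simpa using hx)]
      simp
    | succ m =>
      have ha : a < x := h1 0 (by simp) (by omega)
      rw [List.find?_cons_of_neg (by simp only [decide_eq_true_eq]; omega)]
      have hrec := ih m (by simpa using hn)
        (fun j hj hjm => by simpa using h1 (j+1) (by simpa using Nat.succ_lt_succ hj) (by omega))
        (fun j hj hjm => by simpa using h2 (j+1) (by simpa using Nat.succ_lt_succ hj) (by omega))
      rw [hrec]
      by_cases h : m < t.length
      · rw [dif_pos h, dif_pos (by simpa using Nat.succ_lt_succ h)]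
        simp
      · rw [dif_neg h, dif_neg (by simp; omega)]

theorem pvEvA_val (cs : List Char) (k : Nat) :
    pvHA cs ((k : Int), cs.getD k 'A') = pvEv cs k := by
  have hs := PySem.List.bisectLeft_spec (pvOcc cs (cs.getD k 'A')) ((k : Int) + 3)
    (pvOcc_pairwise cs (cs.getD k 'A'))
  exact (pv_find?_of_bisect ((k : Int) + 3) (pvOcc cs (cs.getD k 'A'))
    (PySem.List.bisectLeft (pvOcc cs (cs.getD k 'A')) ((k : Int) + 3))
    hs.1 hs.2.1 hs.2.2).symm

-- the body of A's events loop, for a generic per-index value function h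
def pvWriteStep {α : Type} (h : Int × Char → Option α)
    (ev : List (Option α)) (p : Int × Char) : List (Option α) :=
  match h p with
  | some v => PySem.List.pySetD ev p.1 (some v)
  | none => ev

-- one-write-per-slot tabulation of A's events loop
theorem pv_tab {α : Type} (h : Int × Char → Option α) :
    ∀ (xs : List Char) (pre : List (Option α)),
    (PySem.List.enumerate xs (pre.length : Int)).foldl (pvWriteStep h)
      (pre ++ List.replicate xs.length none)
    = pre ++ (List.range xs.length).map
        (fun k => h ((((pre.length + k : Nat)) : Int), xs.getD k 'A')) := by
  intro xs
  induction xs with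
  | nil => intro pre; simp [PySem.List.enumerate_nil]
  | cons x t ih =>
    intro pre
    simp only [PySem.List.enumerate_cons, List.foldl_cons]
    have hinit : pvWriteStep h (pre ++ List.replicate (x :: t).length none)
          ((pre.length : Int), x)
        = (pre ++ [h ((pre.length : Int), x)]) ++ List.replicate t.length none := by
      cases hh : h ((pre.length : Int), x) with
      | none => simp [pvWriteStep, hh, List.replicate_succ]
      | some v =>
        simp only [pvWriteStep, hh]
        rw [PySem.List.pySetD_natCast, List.set_append]
        simp [List.replicate_succ]
    rw [hinit]
    have hlen : ((pre.length : Int) + 1)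
        = (((pre ++ [h ((pre.length : Int), x)]).length : Nat) : Int) := by
      simp
    rw [hlen, ih (pre ++ [h ((pre.length : Int), x)]), List.append_assoc, List.singleton_append]
    congr 1
    have hhead : h ((pre.length : Int), x)
        = h (((pre.length + 0 : Nat) : Int), (x :: t).getD 0 'A') := by
      simp
    have htail : (List.range t.length).map
          (fun k => h ((((pre ++ [h ((pre.length : Int), x)]).length + k : Nat) : Int), t.getD k 'A'))
        = (List.range t.length).map
          ((fun k => h (((pre.length + k : Nat) : Int), (x :: t).getD k 'A')) ∘ Nat.succ) := by
      apply List.map_congr_left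
      intro a _
      simp only [Function.comp_def, List.length_append, List.length_singleton,
        Nat.succ_eq_add_one, List.getD_cons_succ]
      congr 2
      push_cast
      ring
    rw [List.length_cons, List.range_succ_eq_map, List.map_cons, List.map_map, ← hhead, ← htail]

theorem pvEventsA_eq (cs : List Char) : pvEventsA cs = pvEvList cs := by
  have hfun : (fun (ev : List (Option Int)) (p : Int × Char) =>
      let lst := (pvIndicesA cs).getD p.2 []
      let nindex := PySem.List.bisectLeft lst (p.1 + 3)
      if h : nindex < lst.length then PySem.List.pySetD ev p.1 (some lst[nindex]) else ev)
      = pvWriteStep (pvHA cs) := by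
    funext ev p
    simp only [pvIndicesA_getD, pvHA, pvWriteStep]
    by_cases h : PySem.List.bisectLeft (pvOcc cs p.2) (p.1 + 3) < (pvOcc cs p.2).length
    · simp [h]
    · simp [h]
  unfold pvEventsA
  rw [hfun]
  rw [show (0 : Int) = ((([] : List (Option Int)).length : Nat) : Int) from by simp,
    show (List.replicate cs.length (none : Option Int))
      = ([] : List (Option Int)) ++ List.replicate cs.length none from (List.nil_append _).symm]
  rw [pv_tab (pvHA cs) cs []]
  simp only [List.nil_append, List.length_nil, Nat.zero_add]
  unfold pvEvList
  apply List.map_congr_left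
  intro k hk
  exact pvEvA_val cs k

-- a one-step unfolding of pvOccFrom
theorem pvOccFrom_succ (cs : List Char) (c : Char) (k : Nat) (hk : k < cs.length) :
    pvOccFrom cs c k = (if (cs.getD k 'A' == c) then ((k : Int) :: pvOccFrom cs c (k+1))
      else pvOccFrom cs c (k+1)) := by
  unfold pvOccFrom
  rw [PySem.List.pyRange_one_cons (by exact_mod_cast hk), List.filter_cons]
  simp only [PySem.List.pyGetD_natCast]
  have hc : ((k + 1 : Nat) : Int) = (k : Int) + 1 := by push_cast; ring
  rw [hc]

-- find? of the ≥ lo+3 predicate only needs the first three elements of a sorted list ≥ lo+1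
theorem pv_find_take3 (lo : Int) :
    ∀ (L : List Int), L.Pairwise (· < ·) → (∀ x ∈ L, lo + 1 ≤ x) →
    (L.take 3).find? (fun j => decide (lo + 3 ≤ j)) = L.find? (fun j => decide (lo + 3 ≤ j)) := by
  intro L
  match L with
  | [] => intro _ _; rfl
  | [a] => intro _ _; rfl
  | [a, b] => intro _ _; rfl
  | a :: b :: c :: t =>
    intro hp hb
    show ([a, b, c].find? _) = _
    by_cases pa : lo + 3 ≤ a
    · simp [List.find?, pa]
    · by_cases pb : lo + 3 ≤ b
      · simp [List.find?, pa, pb]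
      · have pc : lo + 3 ≤ c := by
          have hab : a < b := (List.pairwise_cons.1 hp).1 b (by simp)
          have hbc : b < c := (List.pairwise_cons.1 (List.pairwise_cons.1 hp).2).1 c (by simp)
          have ha' : lo + 1 ≤ a := hb a (by simp)
          omega
        simp [List.find?, pa, pb, pc]

-- positions < k+1 never satisfy the ≥ k+3 predicate, so find? may start at k+1
theorem pv_find_occ_from (cs : List Char) (k : Nat) (hk : k < cs.length) :
    (pvOcc cs (cs.getD k 'A')).find? (fun j => decide ((k : Int) + 3 ≤ j))
    = (pvOccFrom cs (cs.getD k 'A') (k+1)).find? (fun j => decide ((k : Int) + 3 ≤ j)) := by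
  unfold pvOcc pvOccFrom
  rw [PySem.List.pyRange_one_append 0 ((k+1 : Nat) : Int) (cs.length : Int)
    (by positivity) (by exact_mod_cast Nat.succ_le_of_lt hk), List.filter_append,
    List.find?_append]
  have hnone : ((PySem.List.pyRange 0 ((k+1 : Nat) : Int) 1).filter
      (fun j => PySem.List.pyGetD cs j 'A' == cs.getD k 'A')).find?
      (fun j => decide ((k : Int) + 3 ≤ j)) = none := by
    rw [List.find?_eq_none]
    intro x hx
    have hx' := PySem.List.mem_pyRange_one.1 (List.mem_filter.1 hx).1
    simp only [decide_eq_true_eq]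
    push_cast at hx'
    omega
  rw [hnone, Option.none_or]

theorem pvEv_take3 (cs : List Char) (k : Nat) (hk : k < cs.length) :
    ((pvOccFrom cs (cs.getD k 'A') (k+1)).take 3).find? (fun j => decide ((k : Int) + 3 ≤ j))
    = pvEv cs k := by
  rw [pv_find_take3 ((k : Int)) (pvOccFrom cs (cs.getD k 'A') (k+1))
    (pvOccFrom_pairwise cs _ (k+1))
    (fun x hx => by
      have := (mem_pvOccFrom cs _ (k+1) hx).1
      push_cast at this
      omega)]
  unfold pvEv
  exact (pv_find_occ_from cs k hk).symm

theorem pv_stepB_inv (cs : List Char) (k : Nat) (hk : k < cs.length)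
    (st : List (Option Int) × PySem.Dict Char (List Int)) (h : pvInv cs (k + 1) st) :
    pvInv cs k (pvStepB cs st (k : Int)) := by
  obtain ⟨h1, h2⟩ := h
  unfold pvStepB pvInv
  simp only [PySem.List.pyGetD_natCast, h2]
  constructor
  · -- events component
    rw [pvEv_take3 cs k hk]
    cases hE : pvEv cs k with
    | none =>
      dsimp only
      rw [h1]
      apply List.map_congr_left
      intro m hm
      by_cases h' : m < k
      · simp [h', show m < k + 1 by omega]
      · by_cases h'' : m = k
        · subst h''
          simp [hE]
        · simp [h', show ¬ m < k + 1 by omega]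
    | some j =>
      dsimp only
      rw [PySem.List.pySetD_natCast, h1]
      apply List.ext_getElem
      · simp
      · intro m hm1 hm2
        rw [List.getElem_set]
        simp only [List.getElem_map, List.getElem_range]
        by_cases hmk : k = m
        · subst hmk
          simp [hE]
        · rw [if_neg hmk]
          by_cases h' : m < k
          · simp [h', show m < k + 1 by omega]
          · simp [h', show ¬ m < k + 1 by omega]
  · -- dict component
    intro c'
    rw [PySem.Dict.getD_insert]
    by_cases hcc : c' = cs.getD k 'A'
    · rw [if_pos hcc, PySem.List.slice_to _ (by norm_num : (0:Int) ≤ 2),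
        show ((2:Int)).toNat = 2 from rfl, List.take_take,
        show min 2 3 = 2 from rfl, hcc,
        pvOccFrom_succ cs (cs.getD k 'A') k hk]
      simp [List.take_succ_cons]
    · rw [if_neg hcc, h2 c', pvOccFrom_succ cs c' k hk]
      have h3 : ¬ ((cs.getD k 'A' == c') = true) := by
        simpa using fun e => hcc e.symm
      rw [if_neg h3]

theorem pv_descent (cs : List Char) :
    ∀ (i : Nat), i ≤ cs.length → ∀ st, pvInv cs i st →
    pvInv cs 0 ((PySem.List.pyRange ((i : Int) - 1) (-1) (-1)).foldl (pvStepB cs) st) := by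
  intro i
  induction i with
  | zero =>
    intro _ st h
    rw [PySem.List.pyRange_neg_one_eq_nil (by omega)]
    simpa using h
  | succ k ih =>
    intro hk st h
    have h1 : (((k + 1 : Nat)) : Int) - 1 = (k : Int) := by push_cast; ring
    rw [h1, PySem.List.pyRange_neg_one_cons (by omega : (-1 : Int) < (k : Int)), List.foldl_cons]
    exact ih (by omega) _ (pv_stepB_inv cs k (by omega) st h)

theorem pvSweepB_eq (cs : List Char) : (pvSweepB cs).1 = pvEvList cs := by
  have hstep : (fun (st : List (Option Int) × PySem.Dict Char (List Int)) (i : Int) =>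
      let c := PySem.List.pyGetD cs i 'A'
      let occs := st.2.getD c []
      let ev := match occs.find? (fun j => decide (i + 3 ≤ j)) with
        | some j => PySem.List.pySetD st.1 i (some j)
        | none => st.1
      (ev, st.2.insert c (i :: PySem.List.slice occs none (some 2)))) = pvStepB cs := rfl
  have hinit : pvInv cs cs.length (List.replicate cs.length none, PySem.Dict.empty) := by
    constructor
    · symm
      rw [List.eq_replicate_iff]
      refine ⟨by simp, ?_⟩
      intro b hb
      obtain ⟨m, hm, rfl⟩ := List.mem_map.1 hb
      simp [List.mem_range.1 hm]
    · intro c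
      rw [PySem.Dict.getD_empty]
      unfold pvOccFrom
      rw [PySem.List.pyRange_one_eq_nil (le_refl _)]
      rfl
  have h0 := pv_descent cs cs.length (le_refl _) _ hinit
  unfold pvSweepB
  rw [hstep, h0.1]
  unfold pvEvList
  apply List.map_congr_left
  intro m _
  simp

theorem pv_pyGetD_pySetD_int (xs : List Int) (j k v : Int) (hj0 : 0 ≤ j)
    (hj : j < (xs.length : Int)) (hk : 0 ≤ k) :
    PySem.List.pyGetD (PySem.List.pySetD xs j v) k 0
    = if k = j then v else PySem.List.pyGetD xs k 0 := by
  have hjn : j.toNat < xs.length := by omega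
  have h1 := PySem.List.pyGetD_pySetD_natCast xs j.toNat k.toNat v 0 hjn
  rw [Int.toNat_of_nonneg hj0, Int.toNat_of_nonneg hk] at h1
  rw [h1]
  by_cases h : k = j
  · rw [if_pos (by omega : k.toNat = j.toNat), if_pos h]
  · rw [if_neg (by omega : ¬ k.toNat = j.toNat), if_neg h]

theorem pv_pyGetD_replicate (n : Nat) (k : Int) :
    PySem.List.pyGetD (List.replicate n (0 : Int)) k 0 = 0 := by
  by_cases h : PySem.Raise.InRange (List.replicate n (0 : Int)).length k
  · exact List.eq_of_mem_replicate (PySem.List.pyGetD_mem _ 0 h)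
  · exact PySem.List.pyGetD_of_none _ _ _ ((PySem.List.pyGet?_eq_none_iff _ _).2 h)

theorem pv_pyGetD_opt_mem (xs : List (Option Int)) (k : Int) :
    PySem.List.pyGetD xs k none = none ∨ PySem.List.pyGetD xs k none ∈ xs := by
  by_cases h : PySem.Raise.InRange xs.length k
  · exact Or.inr (PySem.List.pyGetD_mem _ _ h)
  · exact Or.inl (PySem.List.pyGetD_of_none _ _ _ ((PySem.List.pyGet?_eq_none_iff _ _).2 h))

theorem pv_hev (cs : List Char) (i j : Int)
    (h : PySem.List.pyGetD (pvEvList cs) i none = some j) :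
    0 ≤ j ∧ j < (cs.length : Int) := by
  rcases pv_pyGetD_opt_mem (pvEvList cs) i with h0 | h0
  · rw [h0] at h; cases h
  · rw [h] at h0
    obtain ⟨m, _, hEv⟩ := List.mem_map.1 h0
    exact mem_pvOcc cs _ (List.mem_of_find?_eq_some hEv)

theorem pv_dp_sim (ev : List (Option Int)) (K : Nat)
    (hev : ∀ (i : Int) (j : Int), PySem.List.pyGetD ev i none = some j → 0 ≤ j ∧ j < (K : Int)) :
    ∀ (l : List Int), (∀ i ∈ l, 0 ≤ i) →
    ∀ (cur : Int) (best : List Int) (pending : PySem.Dict Int Int),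
    best.length = K + 1 →
    (∀ k : Int, 0 ≤ k → PySem.List.pyGetD best k 0 = pending.getD k 0) →
    (l.foldl (fun (st : Int × List Int) i =>
      let best' := match PySem.List.pyGetD ev i none with
        | some nindex => PySem.List.pySetD st.2 nindex (st.1 + 1)
        | none => st.2
      (max st.1 (PySem.List.pyGetD best' i 0), best')) (cur, best)).1
    = (l.foldl (fun (st : Int × PySem.Dict Int Int) i =>
      let pending := match PySem.List.pyGetD ev i none with
        | some j => st.2.insert j (st.1 + 1)
        | none => st.2
      (max st.1 (pending.getD i 0), pending)) (cur, pending)).1 := by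
  intro l
  induction l with
  | nil => intro _ cur best pending _ _; rfl
  | cons i l ih =>
    intro hl cur best pending hlen hinv
    have hi0 : 0 ≤ i := hl i (by simp)
    simp only [List.foldl_cons]
    cases hE : PySem.List.pyGetD ev i none with
    | none =>
      rw [hinv i hi0]
      exact ih (fun x hx => hl x (by simp [hx])) _ _ _ hlen hinv
    | some j =>
      obtain ⟨hj0, hjK⟩ := hev i j hE
      have hinv' : ∀ k : Int, 0 ≤ k →
          PySem.List.pyGetD (PySem.List.pySetD best j (cur + 1)) k 0
          = (pending.insert j (cur + 1)).getD k 0 := by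
        intro k hk
        rw [pv_pyGetD_pySetD_int best j k (cur + 1) hj0 (by rw [hlen]; push_cast; omega) hk,
          PySem.Dict.getD_insert]
        by_cases h : k = j
        · rw [if_pos h, if_pos h]
        · rw [if_neg h, if_neg h, hinv k hk]
      rw [hinv' i hi0]
      exact ih (fun x hx => hl x (by simp [hx])) _ _ _
        (by rw [PySem.List.length_pySetD, hlen]) hinv'

-- ===== VERDICT (by name: the statement is the Claim_ definition above) =====
theorem maxSubstrings_spec : Claim_equal_maxSubstrings := by
  intro word _
  show maxSubstrings word = maxSubstrings_alt word
  unfold maxSubstrings maxSubstrings_alt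
  simp only [pvEventsA_eq, pvSweepB_eq, PySem.Str.len_eq]
  exact pv_dp_sim (pvEvList word.toList) word.toList.length (pv_hev word.toList)
    (PySem.List.pyRange 0 (word.toList.length : Int) 1)
    (fun i hi => (PySem.List.mem_pyRange_one.1 hi).1)
    0 (List.replicate (word.toList.length + 1) 0) PySem.Dict.empty
    (by simp)
    (fun k hk => by rw [pv_pyGetD_replicate, PySem.Dict.getD_empty])
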